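-- pv_equiv track=rewrite | github.com/ingvildeb/brain_section_scripts | make_customregions_from_hierarchy.py | merge_childless_ids_to_below_levels
-- ===== SOURCE A (Python) =====
-- from collections import defaultdict
--
-- def merge_childless_ids_to_below_levels(childless_ids_dict, total_st_levels):
--     merged_childless_ids_dict = defaultdict(list)
--
--     for st_level in range(total_st_levels + 1):
--         for parent_st_level in range(st_level):
--             if parent_st_level in childless_ids_dict:
--                 merged_childless_ids_dict[st_level].extend(childless_ids_dict[parent_st_level])
--         if st_level in childless_ids_dict:
--             merged_childless_ids_dict[st_level].extend(childless_ids_dict[st_level])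
--
--     return dict(merged_childless_ids_dict)
-- ===== SOURCE B (Python) =====
-- def merge_childless_ids_to_below_levels(childless_ids_dict, total_st_levels):
--     pairs = []
--     acc = []
--     seen = False
--     level = 0
--     while level <= total_st_levels:
--         if level in childless_ids_dict:
--             acc = acc + childless_ids_dict[level]
--             seen = True
--         if seen:
--             pairs.append((level, acc))
--         level += 1
--     return dict(pairs)
-- ===== Notes on version B (the rewrite author's own statement) =====
-- stated objective: alternative
-- what changed: A rescans all lower levels for every level with nested range loops over a defaultdict; B runs one while-loop prefix accumulation, extending a single running list per level, tracking key presence with a flag, and emitting (level, prefix) pairs that a final dict() assembles.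
import Mathlib
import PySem

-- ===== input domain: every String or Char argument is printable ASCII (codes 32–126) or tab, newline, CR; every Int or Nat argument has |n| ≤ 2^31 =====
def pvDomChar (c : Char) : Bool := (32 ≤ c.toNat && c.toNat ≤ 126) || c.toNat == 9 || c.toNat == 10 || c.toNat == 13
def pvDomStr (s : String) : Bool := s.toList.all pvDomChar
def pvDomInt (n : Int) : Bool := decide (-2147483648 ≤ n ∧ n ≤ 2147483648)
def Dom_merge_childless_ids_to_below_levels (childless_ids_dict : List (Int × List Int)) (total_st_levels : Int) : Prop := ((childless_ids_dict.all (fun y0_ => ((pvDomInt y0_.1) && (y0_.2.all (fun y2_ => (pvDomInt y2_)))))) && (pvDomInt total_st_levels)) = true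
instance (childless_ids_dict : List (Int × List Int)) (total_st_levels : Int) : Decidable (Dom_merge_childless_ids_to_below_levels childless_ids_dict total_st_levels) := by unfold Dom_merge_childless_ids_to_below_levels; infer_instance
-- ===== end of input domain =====

-- B replaces A's nested per-level rescan of all lower levels by one while-loop prefix
-- accumulation emitting (level, prefix) pairs (objective: alternative single-pass structure).

-- ===== PORT A =====
-- body of A's outer 'for st_level' loop: inner 'for parent_st_level in range(st_level)'
-- scan, then the st_level extend; 'merged[k].extend(v)' on the defaultdict is modelled
-- exactly as insert k (getD k [] ++ v) (the access creates the key, extend appends)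
def mergeA_step (d : PySem.Dict Int (List Int)) (m : PySem.Dict Int (List Int))
    (st_level : Int) : PySem.Dict Int (List Int) :=
  let m := (PySem.List.pyRange 0 st_level 1).foldl
    (fun m parent_st_level =>
      if d.contains parent_st_level then
        m.insert st_level (m.getD st_level [] ++ d.getD parent_st_level [])
      else m) m
  if d.contains st_level then
    m.insert st_level (m.getD st_level [] ++ d.getD st_level [])
  else m

def merge_childless_ids_to_below_levels (childless_ids_dict : List (Int × List Int))
    (total_st_levels : Int) : List (Int × List Int) :=
  let d := PySem.Dict.ofList childless_ids_dict
  ((PySem.List.pyRange 0 (total_st_levels + 1) 1).foldl (mergeA_step d) PySem.Dict.empty).items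

-- ===== PORT B =====
-- B's while loop: state = (acc, seen, pairs), level counts up to total; 'pairs.append'
-- is the list append, 'dict(pairs)' at the end is Dict.ofList … |>.items
def mergeB_loop (d : PySem.Dict Int (List Int)) (total level : Int)
    (acc : List Int) (seen : Bool) (pairs : List (Int × List Int)) :
    List (Int × List Int) :=
  if level ≤ total then
    let acc' := if d.contains level then acc ++ d.getD level [] else acc
    let seen' := seen || d.contains level
    let pairs' := if seen' then pairs ++ [(level, acc')] else pairs
    mergeB_loop d total (level + 1) acc' seen' pairs'
  else pairs
termination_by (total + 1 - level).toNat
decreasing_by omega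

def merge_childless_ids_to_below_levels_alt (childless_ids_dict : List (Int × List Int))
    (total_st_levels : Int) : List (Int × List Int) :=
  let d := PySem.Dict.ofList childless_ids_dict
  (PySem.Dict.ofList (mergeB_loop d total_st_levels 0 [] false [])).items

-- ===== PRECONDITION & SPEC =====
def Spec_merge_childless_ids_to_below_levels (childless_ids_dict : List (Int × List Int)) (total_st_levels : Int) (out : List (Int × List Int)) : Prop := out = merge_childless_ids_to_below_levels_alt childless_ids_dict total_st_levels
instance (childless_ids_dict : List (Int × List Int)) (total_st_levels : Int) (out : List (Int × List Int)) : Decidable (Spec_merge_childless_ids_to_below_levels childless_ids_dict total_st_levels out) := by unfold Spec_merge_childless_ids_to_below_levels; infer_instance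

-- ===== CLAIM (what is proved, stated in full; the proofs are below) =====
def Claim_equal_merge_childless_ids_to_below_levels : Prop := ∀ (childless_ids_dict : List (Int × List Int)) (total_st_levels : Int), Dom_merge_childless_ids_to_below_levels childless_ids_dict total_st_levels → Spec_merge_childless_ids_to_below_levels childless_ids_dict total_st_levels (merge_childless_ids_to_below_levels childless_ids_dict total_st_levels)

-- ===== LEMMAS AND PROOFS =====

-- the present keys below t, and their concatenated lists
def filt (d : PySem.Dict Int (List Int)) (t : Int) : List Int :=
  (PySem.List.pyRange 0 t 1).filter (fun p => d.contains p)
def flat (d : PySem.Dict Int (List Int)) (t : Int) : List Int :=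
  (filt d t).flatMap (fun p => d.getD p [])
-- the items A's dict holds after processing levels 0..t-1
def itemsSpec (d : PySem.Dict Int (List Int)) (t : Int) : List (Int × List Int) :=
  ((PySem.List.pyRange 0 t 1).filter (fun ℓ => decide (filt d (ℓ + 1) ≠ []))).map
    (fun ℓ => (ℓ, flat d (ℓ + 1)))

lemma filt_succ (d : PySem.Dict Int (List Int)) (t : Int) (ht : 0 ≤ t) :
    filt d (t + 1) = filt d t ++ (if d.contains t then [t] else []) := by
  unfold filt
  rw [PySem.List.pyRange_one_succ_right ht, List.filter_append]
  cases hc : d.contains t <;> simp [List.filter, hc]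

lemma flat_succ (d : PySem.Dict Int (List Int)) (t : Int) (ht : 0 ≤ t) :
    flat d (t + 1) = flat d t ++ (if d.contains t then d.getD t [] else []) := by
  unfold flat
  rw [filt_succ d t ht, List.flatMap_append]
  split_ifs <;> simp

lemma filt_succ_ne (d : PySem.Dict Int (List Int)) (t : Int) (ht : 0 ≤ t) :
    decide (filt d (t + 1) ≠ []) = (decide (filt d t ≠ []) || d.contains t) := by
  rw [filt_succ d t ht]
  by_cases h : d.contains t = true <;> by_cases h2 : filt d t = [] <;> simp [h, h2]

-- a nonempty run of 'access-and-extend' writes at one key collapses to a single insert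
lemma extend_run (d : PySem.Dict Int (List Int)) (ℓ : Int) (F : List Int)
    (m : PySem.Dict Int (List Int)) (h : F ≠ []) :
    F.foldl (fun m p => m.insert ℓ (m.getD ℓ [] ++ d.getD p [])) m
      = m.insert ℓ (m.getD ℓ [] ++ F.flatMap (fun p => d.getD p [])) := by
  induction F generalizing m with
  | nil => exact absurd rfl h
  | cons p F ih =>
    cases F with
    | nil => simp [List.foldl]
    | cons q F' =>
      rw [List.foldl_cons, ih _ (by simp)]
      simp [PySem.Dict.getD_insert_self, PySem.Dict.insert_insert_self, List.append_assoc]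

-- one step of A collapses to at most one insert of the whole prefix concatenation
lemma mergeA_step_collapse (d m : PySem.Dict Int (List Int)) (t : Int)
    (ht : 0 ≤ t) (hfresh : m.contains t = false) :
    mergeA_step d m t = if filt d (t + 1) = [] then m else m.insert t (flat d (t + 1)) := by
  have hgD : m.getD t [] = [] := PySem.Dict.getD_of_not_contains m [] hfresh
  have hinner : (PySem.List.pyRange 0 t 1).foldl
      (fun m p => if d.contains p then m.insert t (m.getD t [] ++ d.getD p []) else m) m
      = if filt d t = [] then m else m.insert t (flat d t) := by
    rw [PySem.List.foldl_if_eq_foldl_filter]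
    have hfe : List.filter d.contains (PySem.List.pyRange 0 t 1) = filt d t := rfl
    rw [hfe]
    by_cases h : filt d t = []
    · rw [h]; simp
    · rw [extend_run d t (filt d t) m h, hgD]
      simp [h, flat]
  simp only [mergeA_step]
  rw [hinner]
  rw [filt_succ d t ht, flat_succ d t ht]
  by_cases hc : d.contains t = true
  · by_cases h : filt d t = []
    · simp only [h, if_true, hc]
      simp [hgD, flat, h]
    · simp only [h, if_false, hc, if_true]
      simp [h, PySem.Dict.getD_insert_self, PySem.Dict.insert_insert_self]
  · have hc' : d.contains t = false := by simpa using hc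
    by_cases h : filt d t = [] <;> simp [hc', h]

-- A's loop invariant: after levels 0..t-1 the dict's items are itemsSpec t and no key ≥ t exists
lemma foldA_invariant (d : PySem.Dict Int (List Int)) (t : Nat) :
    ((PySem.List.pyRange 0 (t : Int) 1).foldl (mergeA_step d) PySem.Dict.empty).items
        = itemsSpec d (t : Int)
    ∧ ∀ k : Int, (t : Int) ≤ k →
        ((PySem.List.pyRange 0 (t : Int) 1).foldl (mergeA_step d) PySem.Dict.empty).contains k
          = false := by
  induction t with
  | zero =>
    have h0 : PySem.List.pyRange 0 ((0:Nat):Int) 1 = [] := by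
      rw [PySem.List.pyRange_one]; simp
    rw [h0]
    refine ⟨?_, fun k _ => by simp [pysem]⟩
    have h1 : (PySem.Dict.empty : PySem.Dict Int (List Int)).items = [] := rfl
    rw [List.foldl_nil, h1, itemsSpec, h0]
    simp
  | succ t ih =>
    obtain ⟨ihit, ihfresh⟩ := ih
    have hr : PySem.List.pyRange 0 ((t+1:Nat):Int) 1
        = PySem.List.pyRange 0 (t:Int) 1 ++ [(t:Int)] := by
      push_cast
      exact PySem.List.pyRange_one_succ_right (by positivity)
    rw [hr]
    simp only [List.foldl_append, List.foldl_cons, List.foldl_nil]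
    generalize hmA : (PySem.List.pyRange 0 (t:Int) 1).foldl (mergeA_step d) PySem.Dict.empty
        = mA at ihit ihfresh ⊢
    have hfresh : mA.contains (t:Int) = false := ihfresh _ le_rfl
    have hstep := mergeA_step_collapse d mA (t:Int) (by positivity) hfresh
    have hit : (mergeA_step d mA (t:Int)).items
        = itemsSpec d ((t:Nat) + 1 : Int) := by
      rw [hstep]
      have hspec : itemsSpec d ((t:Nat) + 1 : Int)
          = itemsSpec d (t:Int)
            ++ (if filt d ((t:Int) + 1) = [] then [] else [((t:Int), flat d ((t:Int)+1))]) := by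
        unfold itemsSpec
        rw [PySem.List.pyRange_one_succ_right (by positivity), List.filter_append, List.map_append]
        by_cases h : filt d ((t:Int)+1) = [] <;> simp [List.filter, h]
      rw [hspec, ← ihit]
      by_cases h : filt d ((t:Int) + 1) = []
      · simp [h]
      · simp [h, PySem.Dict.items_insert_of_not_contains mA _ hfresh]
    constructor
    · exact_mod_cast hit
    · intro k hk
      have hk' : (t:Int) + 1 ≤ k := by push_cast at hk; omega
      rw [hstep]
      by_cases h : filt d ((t:Int) + 1) = []
      · simp only [h, if_true]
        exact ihfresh k (by omega)
      · simp only [h, if_false]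
        rw [PySem.Dict.contains_insert]
        have h1 : (k == (t:Int)) = false := by
          simp only [beq_eq_false_iff_ne, ne_eq]; omega
        rw [h1]
        simpa using ihfresh k (by omega)

-- B's loop, entered at level ℓ with the correct prefix state, appends exactly the
-- remaining itemsSpec entries for levels ℓ..T
lemma mergeB_loop_spec (d : PySem.Dict Int (List Int)) (T : Int) (n : Nat) :
    ∀ ℓ : Int, 0 ≤ ℓ → (T + 1 - ℓ).toNat = n →
    ∀ pairs : List (Int × List Int),
    mergeB_loop d T ℓ (flat d ℓ) (decide (filt d ℓ ≠ [])) pairs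
      = pairs ++ ((PySem.List.pyRange ℓ (T + 1) 1).filter
          (fun k => decide (filt d (k + 1) ≠ []))).map (fun k => (k, flat d (k + 1))) := by
  induction n with
  | zero =>
    intro ℓ hℓ hn pairs
    have hgt : ¬ ℓ ≤ T := by omega
    rw [mergeB_loop]
    simp only [hgt, if_false]
    rw [PySem.List.pyRange_one]
    have : (T + 1 - ℓ).toNat = 0 := hn
    simp [this]
  | succ n ih =>
    intro ℓ hℓ hn pairs
    have hle : ℓ ≤ T := by omega
    rw [mergeB_loop]
    simp only [hle, if_true]
    have hacc : (if d.contains ℓ then flat d ℓ ++ d.getD ℓ [] else flat d ℓ)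
        = flat d (ℓ + 1) := by
      rw [flat_succ d ℓ hℓ]; split_ifs <;> simp
    have hseen : (decide (filt d ℓ ≠ []) || d.contains ℓ) = decide (filt d (ℓ + 1) ≠ []) :=
      (filt_succ_ne d ℓ hℓ).symm
    rw [hacc, hseen]
    have hrange : PySem.List.pyRange ℓ (T + 1) 1
        = ℓ :: PySem.List.pyRange (ℓ + 1) (T + 1) 1 :=
      PySem.List.pyRange_one_cons (by omega)
    rw [hrange, List.filter_cons]
    by_cases h : filt d (ℓ + 1) = []
    · have h2 := ih (ℓ + 1) (by omega) (by omega) pairs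
      simp only [h, ne_eq, not_true_eq_false, decide_false] at h2 ⊢
      simpa using h2
    · have h2 := ih (ℓ + 1) (by omega) (by omega) (pairs ++ [(ℓ, flat d (ℓ + 1))])
      simp only [h, ne_eq, not_false_eq_true, decide_true] at h2 ⊢
      simp only [if_true]
      rw [h2]
      simp

-- dict(pairs) keeps a unique-keys list unchanged
lemma ofList_items_of_nodup_keys (L : List (Int × List Int))
    (h : (L.map Prod.fst).Nodup) :
    (PySem.Dict.ofList L).items = L ∧
    ∀ k : Int, k ∉ L.map Prod.fst → (PySem.Dict.ofList L).contains k = false := by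
  induction L using List.reverseRecOn with
  | nil => exact ⟨rfl, fun k _ => PySem.Dict.contains_empty k⟩
  | append_singleton L p ih =>
    rw [List.map_append, List.nodup_append] at h
    obtain ⟨h1, _, h3⟩ := h
    obtain ⟨ihit, ihc⟩ := ih h1
    have hfresh : (PySem.Dict.ofList L).contains p.1 = false := by
      apply ihc
      intro hmem
      exact h3 p.1 hmem p.1 (by simp) rfl
    have hofL : PySem.Dict.ofList (L ++ [p])
        = (PySem.Dict.ofList L).insert p.1 p.2 := by
      simp [PySem.Dict.ofList, PySem.Dict.update, List.foldl_append]
    constructor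
    · rw [hofL, PySem.Dict.items_insert_of_not_contains _ _ hfresh, ihit]
    · intro k hk
      rw [List.map_append] at hk
      simp only [List.mem_append, not_or] at hk
      rw [hofL, PySem.Dict.contains_insert]
      have h1 : (k == p.1) = false := by
        simp only [beq_eq_false_iff_ne, ne_eq]
        intro he; exact hk.2 (by simp [he])
      rw [h1]
      simpa using ihc k hk.1

lemma nodup_keys_itemsSpec (d : PySem.Dict Int (List Int)) (t : Int) :
    ((itemsSpec d t).map Prod.fst).Nodup := by
  unfold itemsSpec
  rw [List.map_map]
  have : (Prod.fst ∘ fun ℓ => ((ℓ : Int), flat d (ℓ + 1))) = id := rfl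
  rw [this, List.map_id]
  apply List.Nodup.filter
  rw [PySem.List.pyRange_one]
  exact (List.nodup_range).map (fun a b hab => by omega)

-- ===== VERDICT (by name: the statement is the Claim_ definition above) =====
theorem merge_childless_ids_to_below_levels_spec : Claim_equal_merge_childless_ids_to_below_levels := by
  intro childless_ids_dict total_st_levels _
  unfold Spec_merge_childless_ids_to_below_levels
  unfold merge_childless_ids_to_below_levels merge_childless_ids_to_below_levels_alt
  dsimp only
  set d := PySem.Dict.ofList childless_ids_dict with hd
  set T := total_st_levels with hT
  have hflat0 : flat d 0 = [] := by simp [flat, filt]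
  have hfilt0 : decide (filt d 0 ≠ []) = false := by
    simp [filt]
  have hB := mergeB_loop_spec d T (T + 1 - 0).toNat 0 le_rfl rfl []
  rw [hflat0, hfilt0] at hB
  have hrange : PySem.List.pyRange 0 (T + 1) 1
      = PySem.List.pyRange 0 (((T + 1).toNat : Nat) : Int) 1 := by
    have hn : (T + 1 - 0).toNat = ((((T + 1).toNat : Nat) : Int) - 0).toNat := by omega
    rw [PySem.List.pyRange_one, PySem.List.pyRange_one, hn]
  have hA := (foldA_invariant d (T + 1).toNat).1
  rw [← hrange] at hA
  have hspec : itemsSpec d (T + 1)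
      = ((PySem.List.pyRange 0 (T + 1) 1).filter
          (fun k => decide (filt d (k + 1) ≠ []))).map (fun k => (k, flat d (k + 1))) := by
    unfold itemsSpec; rw [hrange]
  have hitems : ((PySem.List.pyRange 0 (T + 1) 1).foldl (mergeA_step d) PySem.Dict.empty).items
      = mergeB_loop d T 0 [] false [] := by
    rw [hB, List.nil_append, hA]
    have : itemsSpec d (((T + 1).toNat : Nat) : Int) = itemsSpec d (T + 1) := by
      unfold itemsSpec; rw [← hrange]
    rw [this, hspec]
  have hnodup : ((mergeB_loop d T 0 [] false []).map Prod.fst).Nodup := by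
    rw [← hitems, hA]
    have : itemsSpec d (((T + 1).toNat : Nat) : Int) = itemsSpec d (T + 1) := by
      unfold itemsSpec; rw [← hrange]
    rw [this]
    exact nodup_keys_itemsSpec d (T + 1)
  rw [hitems, (ofList_items_of_nodup_keys _ hnodup).1]
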